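-- pv_equiv track=rewrite | github.com/StanH123h/Algorithm-Learning | Code/LeetCode/LC1196.Max Apple Carry/Greedy.py | maxNumberOfApples
-- ===== SOURCE A (Python) =====
-- from typing import List
--
-- def maxNumberOfApples(weight: List[int]) -> int:
--     # 思路:每次都装目前最轻的苹果
--     weight.sort()
--     capacity = 5000
--     result = 0
--     for heaviness in weight:
--         if capacity >= heaviness:
--             capacity -= heaviness
--             result += 1
--         else:
--             break
--     return result
-- ===== SOURCE B (Python) =====
-- from typing import List
--
-- def maxNumberOfApples(weight: List[int]) -> int:
--     # Greedy count via prefix sums + binary search instead of subtract-until-break.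
--     weight.sort()
--     prefixes = []
--     total = 0
--     for w in weight:
--         total += w
--         prefixes.append(total)
--     # rightmost position whose prefix sum is <= 5000 (prefixes are partitioned
--     # around 5000: once a prefix exceeds 5000 the remaining increments are positive)
--     lo, hi = 0, len(prefixes)
--     while lo < hi:
--         mid = (lo + hi) // 2
--         if prefixes[mid] <= 5000:
--             lo = mid + 1
--         else:
--             hi = mid
--     return lo
-- ===== Notes on version B (the rewrite author's own statement) =====
-- stated objective: alternative
-- what changed: Replaces A's subtract-until-break linear scan by building the running prefix sums of the sorted list and binary-searching for the rightmost prefix sum within the 5000 capacity.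
import Mathlib
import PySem

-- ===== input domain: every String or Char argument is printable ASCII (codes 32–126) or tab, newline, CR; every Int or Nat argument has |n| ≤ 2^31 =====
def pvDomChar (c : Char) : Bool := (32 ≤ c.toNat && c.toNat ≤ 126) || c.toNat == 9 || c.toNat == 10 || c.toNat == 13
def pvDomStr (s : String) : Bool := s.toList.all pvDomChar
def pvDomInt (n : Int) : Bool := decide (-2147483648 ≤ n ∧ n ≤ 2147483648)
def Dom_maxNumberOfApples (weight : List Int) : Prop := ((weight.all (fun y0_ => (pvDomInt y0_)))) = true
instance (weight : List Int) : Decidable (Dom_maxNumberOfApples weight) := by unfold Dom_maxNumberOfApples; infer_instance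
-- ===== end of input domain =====

-- B replaces A's subtract-until-break scan of the sorted list by a prefix-sum table plus a
-- binary search (objective: alternative decomposition). Both A and B sort the argument in
-- place; the equivalence proved here is about the return value (the mutation is identical).

-- ===== PORT A =====
-- the for-loop with break: state (capacity, result)
def maxNumberOfApplesLoop : List Int → Int → Int → Int
  | [], _, result => result
  | h :: t, capacity, result =>
    if capacity ≥ h then maxNumberOfApplesLoop t (capacity - h) (result + 1)
    else result

def maxNumberOfApples (weight : List Int) : Int :=
  maxNumberOfApplesLoop (PySem.List.sorted weight (fun x => x) false) 5000 0

-- ===== PORT B =====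
-- the prefix-sum building loop of Source B (state: total, appended list)
def altPrefixes : List Int → Int → List Int
  | [], _ => []
  | w :: t, total => (total + w) :: altPrefixes t (total + w)

-- the while-loop of Source B's binary search; prefixes[mid] is read with getD, exact here since
-- 0 ≤ lo ≤ mid < hi ≤ len(prefixes) whenever it is read
def altBisect (p : List Int) (lo hi : Nat) : Nat :=
  if _h : lo < hi then
    if p.getD ((lo + hi) / 2) 0 ≤ 5000 then altBisect p ((lo + hi) / 2 + 1) hi
    else altBisect p lo ((lo + hi) / 2)
  else lo
termination_by hi - lo
decreasing_by all_goals omega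

def maxNumberOfApples_alt (weight : List Int) : Int :=
  let prefixes := altPrefixes (PySem.List.sorted weight (fun x => x) false) 0
  (altBisect prefixes 0 prefixes.length : Int)

-- ===== PRECONDITION & SPEC =====
def Spec_maxNumberOfApples (weight : List Int) (out : Int) : Prop := out = maxNumberOfApples_alt weight
instance (weight : List Int) (out : Int) : Decidable (Spec_maxNumberOfApples weight out) := by unfold Spec_maxNumberOfApples; infer_instance

-- ===== CLAIM (what is proved, stated in full; the proofs are below) =====
def Claim_equal_maxNumberOfApples : Prop := ∀ (weight : List Int), Dom_maxNumberOfApples weight → Spec_maxNumberOfApples weight (maxNumberOfApples weight)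

-- ===== LEMMAS AND PROOFS =====

-- number of greedy steps A takes on list l with remaining capacity cap
def greedyCnt : List Int → Int → Nat
  | [], _ => 0
  | h :: t, cap => if cap ≥ h then greedyCnt t (cap - h) + 1 else 0

theorem loop_eq_cnt : ∀ (l : List Int) (cap r : Int),
    maxNumberOfApplesLoop l cap r = r + (greedyCnt l cap : Int) := by
  intro l
  induction l with
  | nil => intro cap r; simp [maxNumberOfApplesLoop, greedyCnt]
  | cons h t ih =>
    intro cap r
    by_cases hc : cap ≥ h
    · simp [maxNumberOfApplesLoop, greedyCnt, hc, ih]; ring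
    · simp [maxNumberOfApplesLoop, greedyCnt, hc]

theorem length_altPrefixes : ∀ (l : List Int) (s : Int), (altPrefixes l s).length = l.length := by
  intro l; induction l with
  | nil => intro s; rfl
  | cons h t ih => intro s; simp [altPrefixes, ih]

theorem cnt_le_length : ∀ (l : List Int) (cap : Int), greedyCnt l cap ≤ l.length := by
  intro l; induction l with
  | nil => intro cap; simp [greedyCnt]
  | cons h t ih =>
    intro cap
    by_cases hc : cap ≥ h
    · simp [greedyCnt, hc]; exact ih _
    · simp [greedyCnt, hc]

-- prefixes strictly below the greedy count stay within the bound
theorem part_le : ∀ (l : List Int) (s X : Int) (j : Nat) (hj : j < (altPrefixes l s).length),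
    j < greedyCnt l (X - s) → (altPrefixes l s)[j] ≤ X := by
  intro l
  induction l with
  | nil => intro s X j hj; simp [altPrefixes] at hj
  | cons h t ih =>
    intro s X j hj hlt
    by_cases hc : X - s ≥ h
    · cases j with
      | zero => simpa [altPrefixes] using by linarith
      | succ j' =>
        simp only [greedyCnt, if_pos hc] at hlt
        have hj' : j' < (altPrefixes t (s + h)).length := by simpa [altPrefixes] using hj
        have hlt' : j' < greedyCnt t (X - (s + h)) := by
          have he : X - (s + h) = X - s - h := by ring
          rw [he]; omega
        simpa [altPrefixes] using ih (s + h) X j' hj' hlt'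
    · simp [greedyCnt, hc] at hlt

-- if every element is positive and the start already exceeds X, every prefix exceeds X
theorem all_gt : ∀ (l : List Int) (s X : Int), (∀ y ∈ l, 0 < y) → X < s →
    ∀ (j : Nat) (hj : j < (altPrefixes l s).length), X < (altPrefixes l s)[j] := by
  intro l
  induction l with
  | nil => intro s X _ _ j hj; simp [altPrefixes] at hj
  | cons h t ih =>
    intro s X hpos hX j hj
    have hh : 0 < h := hpos h (List.mem_cons_self ..)
    cases j with
    | zero => simpa [altPrefixes] using by linarith
    | succ j' =>
      have hj' : j' < (altPrefixes t (s + h)).length := by simpa [altPrefixes] using hj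
      have := ih (s + h) X (fun y hy => hpos y (List.mem_cons_of_mem _ hy)) (by linarith) j' hj'
      simpa [altPrefixes] using this

-- prefixes at and beyond the greedy count exceed the bound (sortedness + nonneg capacity)
theorem part_gt : ∀ (l : List Int) (s X : Int), l.Pairwise (· ≤ ·) → 0 ≤ X - s →
    ∀ (j : Nat) (hj : j < (altPrefixes l s).length),
    greedyCnt l (X - s) ≤ j → X < (altPrefixes l s)[j] := by
  intro l
  induction l with
  | nil => intro s X _ _ j hj; simp [altPrefixes] at hj
  | cons h t ih =>
    intro s X hpw hcap j hj hge
    rw [List.pairwise_cons] at hpw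
    by_cases hc : X - s ≥ h
    · simp only [greedyCnt, if_pos hc] at hge
      cases j with
      | zero => omega
      | succ j' =>
        have hj' : j' < (altPrefixes t (s + h)).length := by simpa [altPrefixes] using hj
        have hge' : greedyCnt t (X - (s + h)) ≤ j' := by
          have : X - (s + h) = X - s - h := by ring
          rw [this]; omega
        have := ih (s + h) X hpw.2 (by linarith) j' hj' hge'
        simpa [altPrefixes] using this
    · -- first element already exceeds; h > X - s ≥ 0 so the rest is positive too
      have hh : X < s + h := by linarith
      cases j with
      | zero => simpa [altPrefixes] using hh
      | succ j' =>
        have hj' : j' < (altPrefixes t (s + h)).length := by simpa [altPrefixes] using hj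
        have hpos : ∀ y ∈ t, 0 < y := fun y hy => by
          have := hpw.1 y hy; linarith
        have := all_gt t (s + h) X hpos hh j' hj'
        simpa [altPrefixes] using this

-- binary-search correctness on a list partitioned at k around 5000
theorem altBisect_eq (p : List Int) : ∀ (n lo hi k : Nat), hi - lo ≤ n → lo ≤ k → k ≤ hi →
    hi ≤ p.length →
    (∀ (j : Nat) (hj : j < p.length), j < k → p[j] ≤ 5000) →
    (∀ (j : Nat) (hj : j < p.length), k ≤ j → 5000 < p[j]) →
    altBisect p lo hi = k := by
  intro n
  induction n with
  | zero =>
    intro lo hi k hfuel hlo hhi _ _ _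
    rw [altBisect]
    have : ¬ lo < hi := by omega
    simp [this]; omega
  | succ n ih =>
    intro lo hi k hfuel hlo hhi hlen hle hgt
    rw [altBisect]
    by_cases hlt : lo < hi
    · have hmid : (lo + hi) / 2 < p.length := by omega
      have hmget : p.getD ((lo + hi) / 2) 0 = p[(lo + hi) / 2] := List.getD_eq_getElem p 0 hmid
      by_cases hcase : p.getD ((lo + hi) / 2) 0 ≤ 5000
      · -- mid's prefix within bound ⇒ mid < k
        have hk : (lo + hi) / 2 < k := by
          by_contra hnk
          have := hgt ((lo + hi) / 2) hmid (by omega)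
          rw [hmget] at hcase; omega
        simp only [hlt, dif_pos, if_pos hcase]
        exact ih ((lo + hi) / 2 + 1) hi k (by omega) (by omega) hhi hlen hle hgt
      · have hk : k ≤ (lo + hi) / 2 := by
          by_contra hnk
          have := hle ((lo + hi) / 2) hmid (by omega)
          rw [hmget] at hcase; omega
        simp only [hlt, dif_pos, if_neg hcase]
        exact ih lo ((lo + hi) / 2) k (by omega) hlo hk (by omega) hle hgt
    · simp [hlt]; omega

-- ===== VERDICT (by name: the statement is the Claim_ definition above) =====
theorem maxNumberOfApples_spec : Claim_equal_maxNumberOfApples := by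
  intro weight _
  unfold Spec_maxNumberOfApples maxNumberOfApples maxNumberOfApples_alt
  set w := PySem.List.sorted weight (fun x => x) false with hw
  set p := altPrefixes w 0 with hp
  show maxNumberOfApplesLoop w 5000 0 = ((altBisect p 0 p.length : Nat) : Int)
  have hpw : w.Pairwise (· ≤ ·) := by
    simpa using PySem.List.sorted_pairwise weight (fun x => x)
  have hk : greedyCnt w 5000 ≤ p.length := by
    rw [hp, length_altPrefixes]; exact cnt_le_length w 5000
  have h50 : (5000 : Int) - 0 = 5000 := by ring
  have hbis : altBisect p 0 p.length = greedyCnt w 5000 :=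
    altBisect_eq p p.length 0 p.length (greedyCnt w 5000) (by omega) (by omega) hk (le_refl _)
      (fun j hj hjk => part_le w 0 5000 j (by simpa [hp] using hj) (by rw [h50]; exact hjk))
      (fun j hj hjk => part_gt w 0 5000 hpw (by norm_num) j (by simpa [hp] using hj)
        (by rw [h50]; exact hjk))
  rw [loop_eq_cnt, hbis]
  ring
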